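-- pv_equiv track=rewrite | github.com/pavel-paulau/moveit | moveit/flow.py | estimate_concurrency
-- ===== SOURCE A (Python) =====
-- from collections import defaultdict, OrderedDict
--
-- def estimate_concurrency(movements):
--     timings = defaultdict(list)
--     movements_per_dest = defaultdict(int)
--     for dest_node, vbuckets in movements.items():
--         for vbucket, ((start, src_node), (end, _)) in vbuckets.items():
--             timings[dest_node].append((vbucket, src_node, start, end))
--             if src_node != dest_node:
--                 movements_per_dest[dest_node] += 1
--
--     concurrency_per_dest = dict()
--     for dest_node, vbuckets in movements.items():
--         max_concurrency = 0
--         for vbucket, ((start, src_node), (end, _)) in vbuckets.items():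
--             if src_node != dest_node:
--                 concurrency = 0
--                 for _vbucket, _src_node, _start, _end in timings[dest_node]:
--                     if vbucket != _vbucket:
--                         if _start < start < _end or _start < end < _end:
--                             concurrency += 1
--                 max_concurrency = max(max_concurrency, concurrency)
--         concurrency_per_dest[dest_node] = max_concurrency
--
--     return concurrency_per_dest, movements_per_dest
-- ===== SOURCE B (Python) =====
-- from bisect import bisect_left, bisect_right, insort
--
--
-- def estimate_concurrency(movements):
--     concurrency_per_dest = {}
--     movements_per_dest = {}
--     for dest_node, vbuckets in movements.items():
--         queries = []   # (lo, hi, start, end) for movements coming from another node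
--         ivals = []     # (start, end) pairs that can strictly contain a point
--         for vbucket, ((start, src_node), (end, _)) in vbuckets.items():
--             if src_node != dest_node:
--                 queries.append((min(start, end), max(start, end), start, end))
--             if start < end:
--                 ivals.append((start, end))
--         if queries:
--             movements_per_dest[dest_node] = len(queries)
--         starts = sorted(s for s, e in ivals)
--         ends = sorted(e for s, e in ivals)
--         ivals.sort(key=lambda iv: iv[0])
--         queries.sort(key=lambda q: q[0])
--         best = 0
--         seen_ends = []  # sorted ends of intervals whose start is < current lo
--         rest = 0        # index into ivals: first interval not yet swept in
--         for lo, hi, start, end in queries: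
--             while rest < len(ivals) and ivals[rest][0] < lo:
--                 insort(seen_ends, ivals[rest][1])
--                 rest += 1
--             # |{intervals strictly containing start}| + |{… end}| - |{… both}|
--             stab_s = bisect_left(starts, start) - bisect_right(ends, start)
--             stab_e = bisect_left(starts, end) - bisect_right(ends, end)
--             both = len(seen_ends) - bisect_right(seen_ends, hi)
--             c = stab_s + stab_e - both
--             if c > best:
--                 best = c
--         concurrency_per_dest[dest_node] = best
--     return concurrency_per_dest, movements_per_dest
-- ===== Notes on version B (the rewrite author's own statement) =====
-- stated objective: alternative
-- what changed: Instead of A's nested scan that recounts all of a destination's intervals for every vbucket, B sorts interval endpoints once per destination and computes each vbucket's overlap count as two binary-search point-stab counts plus an inclusion-exclusion 'contains both endpoints' term maintained by a sorted sweep over queries ordered by their lower endpoint.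
import Mathlib
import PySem

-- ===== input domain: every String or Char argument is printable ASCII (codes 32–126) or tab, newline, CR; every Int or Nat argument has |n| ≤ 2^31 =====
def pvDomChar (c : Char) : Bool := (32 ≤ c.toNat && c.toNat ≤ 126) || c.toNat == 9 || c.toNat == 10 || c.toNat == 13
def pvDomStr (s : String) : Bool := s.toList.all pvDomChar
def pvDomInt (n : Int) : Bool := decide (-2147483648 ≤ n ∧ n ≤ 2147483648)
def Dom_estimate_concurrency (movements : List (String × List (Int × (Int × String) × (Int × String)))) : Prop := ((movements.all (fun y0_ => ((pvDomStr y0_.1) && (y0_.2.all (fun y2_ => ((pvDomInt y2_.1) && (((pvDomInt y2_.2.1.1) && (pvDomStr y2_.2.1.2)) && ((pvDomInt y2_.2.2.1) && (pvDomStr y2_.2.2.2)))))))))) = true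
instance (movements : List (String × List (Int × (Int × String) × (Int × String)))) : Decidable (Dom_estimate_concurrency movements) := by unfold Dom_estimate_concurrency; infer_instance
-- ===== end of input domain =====

-- B restructures A's nested per-vbucket scans into sorted endpoint lists queried by binary search
-- plus an inclusion-exclusion sweep; the ports agree on all dict-shaped inputs (Pre_).

-- ===== PORT A =====
-- literal transliteration of Source A: two passes over movements; timings / movements_per_dest are
-- defaultdicts (PySem.Dict.modify), concurrency_per_dest a dict built by insert.
def estimate_concurrency (movements : List (String × List (Int × (Int × String) × (Int × String)))) : (List (String × Int)) × (List (String × Int)) :=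
  let st := movements.foldl (fun st p =>
    p.2.foldl (fun (st : PySem.Dict String (List (Int × String × Int × Int)) × PySem.Dict String Int) q =>
      (st.1.modify p.1 [] (fun l => l ++ [(q.1, q.2.1.2, q.2.1.1, q.2.2.1)]),
       if q.2.1.2 ≠ p.1 then st.2.modify p.1 0 (· + 1) else st.2)) st)
    (PySem.Dict.empty, PySem.Dict.empty)
  let timings := st.1
  let movements_per_dest := st.2
  let concurrency_per_dest := movements.foldl (fun cpd p =>
    let mx := p.2.foldl (fun mx q =>
      if q.2.1.2 ≠ p.1 then
        let c := (timings.getD p.1 []).foldl (fun c t =>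
          if t.1 ≠ q.1 then
            if (t.2.2.1 < q.2.1.1 ∧ q.2.1.1 < t.2.2.2) ∨ (t.2.2.1 < q.2.2.1 ∧ q.2.2.1 < t.2.2.2) then c + 1
            else c
          else c) (0 : Int)
        max mx c
      else mx) (0 : Int)
    cpd.insert p.1 mx) (PySem.Dict.empty : PySem.Dict String Int)
  (concurrency_per_dest.items, movements_per_dest.items)

-- ===== PORT B =====
-- bisect.insort (Source B): insert after existing equal elements
def pvInsort (x : Int) : List Int → List Int
  | [] => [x]
  | y :: t => if x < y then x :: y :: t else y :: pvInsort x t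

-- the inner 'while rest < len(ivals) and ivals[rest][0] < lo' loop; the index 'rest' is the
-- remaining suffix of the sorted interval list
def pvAdvance (lo : Int) : List (Int × Int) → List Int → List (Int × Int) × List Int
  | [], seen => ([], seen)
  | iv :: r, seen => if iv.1 < lo then pvAdvance lo r (pvInsort iv.2 seen) else (iv :: r, seen)

-- the 'for lo, hi, start, end in queries' sweep of Source B
def pvSweep (starts ends : List Int) : List (Int × Int × Int × Int) → List (Int × Int) → List Int → Int → Int
  | [], _, _, best => best
  | q :: qs, rest, seen, best =>
    let rs := pvAdvance q.1 rest seen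
    let stabS : Int := (PySem.List.bisectLeft starts q.2.2.1 : Int) - (PySem.List.bisectRight ends q.2.2.1 : Int)
    let stabE : Int := (PySem.List.bisectLeft starts q.2.2.2 : Int) - (PySem.List.bisectRight ends q.2.2.2 : Int)
    let both : Int := (rs.2.length : Int) - (PySem.List.bisectRight rs.2 q.2.1 : Int)
    let c := stabS + stabE - both
    pvSweep starts ends qs rs.1 rs.2 (if c > best then c else best)

-- transliteration of Source B; its two result dicts are written with keys that are fresh under
-- Pre_ (distinct dest keys), so the dict writes are ported as list appends.
def estimate_concurrency_alt (movements : List (String × List (Int × (Int × String) × (Int × String)))) : (List (String × Int)) × (List (String × Int)) :=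
  movements.foldl (fun (acc : List (String × Int) × List (String × Int)) (p : String × List (Int × (Int × String) × (Int × String))) =>
    let dest := p.1
    let qi := p.2.foldl (fun (qi : List (Int × Int × Int × Int) × List (Int × Int)) q =>
      (if q.2.1.2 ≠ dest then qi.1 ++ [(min q.2.1.1 q.2.2.1, max q.2.1.1 q.2.2.1, q.2.1.1, q.2.2.1)] else qi.1,
       if q.2.1.1 < q.2.2.1 then qi.2 ++ [(q.2.1.1, q.2.2.1)] else qi.2)) (([], []) : List (Int × Int × Int × Int) × List (Int × Int))
    let mpd := if qi.1 ≠ [] then acc.2 ++ [(dest, (qi.1.length : Int))] else acc.2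
    let starts := PySem.List.sorted (qi.2.map (·.1)) (fun x => x)
    let ends := PySem.List.sorted (qi.2.map (·.2)) (fun x => x)
    let ivs := PySem.List.sorted qi.2 (·.1)
    let qs := PySem.List.sorted qi.1 (·.1)
    let best := pvSweep starts ends qs ivs [] 0
    (acc.1 ++ [(dest, best)], mpd)) ([], [])

-- ===== PRECONDITION & SPEC =====
-- Pre_ excludes association lists with a duplicated dict key (a duplicated destination node, or a
-- duplicated vbucket id within one destination): such lists do not represent any Python dict input.
def Pre_estimate_concurrency (movements : List (String × List (Int × (Int × String) × (Int × String)))) : Prop :=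
  (movements.map Prod.fst).Nodup ∧ ∀ p ∈ movements, (p.2.map Prod.fst).Nodup
instance (movements : List (String × List (Int × (Int × String) × (Int × String)))) : Decidable (Pre_estimate_concurrency movements) := by unfold Pre_estimate_concurrency; infer_instance
def pvWitness_estimate_concurrency : (List (String × List (Int × (Int × String) × (Int × String)))) :=
  [("a", [(0, ((0, "b"), (3, "b"))), (1, ((1, "b"), (2, "b")))]), ("b", [])]

def Spec_estimate_concurrency (movements : List (String × List (Int × (Int × String) × (Int × String)))) (out : (List (String × Int)) × (List (String × Int))) : Prop := out = estimate_concurrency_alt movements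
instance (movements : List (String × List (Int × (Int × String) × (Int × String)))) (out : (List (String × Int)) × (List (String × Int))) : Decidable (Spec_estimate_concurrency movements out) := by unfold Spec_estimate_concurrency; infer_instance

-- ===== CLAIM (what is proved, stated in full; the proofs are below) =====
def Claim_equal_estimate_concurrency : Prop := ∀ (movements : List (String × List (Int × (Int × String) × (Int × String)))), Dom_estimate_concurrency movements → Pre_estimate_concurrency movements → Spec_estimate_concurrency movements (estimate_concurrency movements)

-- ===== LEMMAS AND PROOFS =====

-- canonical per-destination data
def pvEntry (q : Int × (Int × String) × (Int × String)) : Int × String × Int × Int :=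
  (q.1, q.2.1.2, q.2.1.1, q.2.2.1)
def pvEntries (vbs : List (Int × (Int × String) × (Int × String))) : List (Int × String × Int × Int) :=
  vbs.map pvEntry
def pvIvals (vbs : List (Int × (Int × String) × (Int × String))) : List (Int × Int) :=
  (vbs.filter (fun q => decide (q.2.1.1 < q.2.2.1))).map (fun q => (q.2.1.1, q.2.2.1))
def pvQueries (dest : String) (vbs : List (Int × (Int × String) × (Int × String))) : List (Int × Int × Int × Int) :=
  (vbs.filter (fun q => decide (q.2.1.2 ≠ dest))).map (fun q => (min q.2.1.1 q.2.2.1, max q.2.1.1 q.2.2.1, q.2.1.1, q.2.2.1))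
def pvStab (ivals : List (Int × Int)) (p : Int) : Int :=
  ((ivals.countP (fun iv => decide (iv.1 < p))) : Int) - ((ivals.countP (fun iv => decide (iv.2 ≤ p))) : Int)
def pvBoth (ivals : List (Int × Int)) (lo hi : Int) : Int :=
  ((ivals.countP (fun iv => decide (iv.1 < lo ∧ hi < iv.2))) : Int)
def pvF (ivals : List (Int × Int)) (q : Int × Int × Int × Int) : Int :=
  pvStab ivals q.2.2.1 + pvStab ivals q.2.2.2 - pvBoth ivals q.1 q.2.1
def pvVal (dest : String) (vbs : List (Int × (Int × String) × (Int × String))) : Int :=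
  (pvQueries dest vbs).foldl (fun b q => max b (pvF (pvIvals vbs) q)) 0
def pvCnt (dest : String) (vbs : List (Int × (Int × String) × (Int × String))) : Nat :=
  vbs.countP (fun q => decide (q.2.1.2 ≠ dest))
def pvCanonM (movements : List (String × List (Int × (Int × String) × (Int × String)))) : List (String × Int) :=
  (movements.filter (fun p => decide (pvCnt p.1 p.2 ≠ 0))).map (fun p => (p.1, (pvCnt p.1 p.2 : Int)))
def pvCanonC (movements : List (String × List (Int × (Int × String) × (Int × String)))) : List (String × Int) :=
  movements.map (fun p => (p.1, pvVal p.1 p.2))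


-- pvInsort (bisect.insort) facts
theorem pvInsort_perm (x : Int) (l : List Int) : (pvInsort x l).Perm (x :: l) := by
  induction l with
  | nil => simp [pvInsort]
  | cons y t ih =>
    simp only [pvInsort]
    split
    · exact List.Perm.refl _
    · exact ((ih.cons y).trans (List.Perm.swap x y t)).symm.symm

theorem pvInsort_pairwise (x : Int) (l : List Int) (h : l.Pairwise (· ≤ ·)) :
    (pvInsort x l).Pairwise (· ≤ ·) := by
  induction l with
  | nil => simp [pvInsort]
  | cons y t ih =>
    simp only [pvInsort]
    rcases List.pairwise_cons.mp h with ⟨hy, ht⟩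
    split
    · rename_i hlt
      refine List.pairwise_cons.mpr ⟨?_, h⟩
      intro a ha
      rcases List.mem_cons.mp ha with rfl | ha
      · omega
      · exact le_trans (le_of_lt hlt) (hy a ha)
    · rename_i hge
      refine List.pairwise_cons.mpr ⟨?_, ih ht⟩
      intro a ha
      rcases List.mem_cons.mp ((pvInsort_perm x t).mem_iff.mp ha) with rfl | h2
      · omega
      · exact hy a h2

-- bisect on a sorted list counts
theorem pv_bisectLeft_eq (xs : List Int) (p : Int) (h : xs.Pairwise (· ≤ ·)) :
    PySem.List.bisectLeft xs p = xs.countP (fun y => decide (y < p)) := by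
  obtain ⟨hle, hlt, hge⟩ := PySem.List.bisectLeft_spec xs p h
  set i := PySem.List.bisectLeft xs p with hi
  have hsplit : xs = xs.take i ++ xs.drop i := (List.take_append_drop i xs).symm
  rw [hsplit, List.countP_append]
  have h1 : (xs.take i).countP (fun y => decide (y < p)) = i := by
    have : ∀ a ∈ xs.take i, (fun y => decide (y < p)) a = true := by
      intro a ha
      rw [List.mem_iff_getElem] at ha
      obtain ⟨j, hj, rfl⟩ := ha
      have hj' : j < i := lt_of_lt_of_le hj (by simp)
      have hjx : j < xs.length := lt_of_lt_of_le hj' hle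
      simp only [List.getElem_take]
      simpa using hlt j hjx hj'
    rw [List.countP_eq_length.mpr this, List.length_take]
    omega
  have h2 : (xs.drop i).countP (fun y => decide (y < p)) = 0 := by
    rw [List.countP_eq_zero]
    intro a ha
    rw [List.mem_iff_getElem] at ha
    obtain ⟨j, hj, rfl⟩ := ha
    have hjx : i + j < xs.length := by
      have := List.length_drop (l := xs) (i := i); omega
    simp only [List.getElem_drop]
    have := hge (i + j) hjx (by omega)
    simpa using not_lt.mpr this
  omega

theorem pv_bisectRight_eq (xs : List Int) (p : Int) (h : xs.Pairwise (· ≤ ·)) :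
    PySem.List.bisectRight xs p = xs.countP (fun y => decide (y ≤ p)) := by
  obtain ⟨hle, hlt, hge⟩ := PySem.List.bisectRight_spec xs p h
  set i := PySem.List.bisectRight xs p with hi
  have hsplit : xs = xs.take i ++ xs.drop i := (List.take_append_drop i xs).symm
  rw [hsplit, List.countP_append]
  have h1 : (xs.take i).countP (fun y => decide (y ≤ p)) = i := by
    have : ∀ a ∈ xs.take i, (fun y => decide (y ≤ p)) a = true := by
      intro a ha
      rw [List.mem_iff_getElem] at ha
      obtain ⟨j, hj, rfl⟩ := ha
      have hj' : j < i := lt_of_lt_of_le hj (by simp)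
      have hjx : j < xs.length := lt_of_lt_of_le hj' hle
      simp only [List.getElem_take]
      simpa using hlt j hjx hj'
    rw [List.countP_eq_length.mpr this, List.length_take]
    omega
  have h2 : (xs.drop i).countP (fun y => decide (y ≤ p)) = 0 := by
    rw [List.countP_eq_zero]
    intro a ha
    rw [List.mem_iff_getElem] at ha
    obtain ⟨j, hj, rfl⟩ := ha
    have hjx : i + j < xs.length := by
      have := List.length_drop (l := xs) (i := i); omega
    simp only [List.getElem_drop]
    have := hge (i + j) hjx (by omega)
    simpa using not_le.mpr this
  omega

theorem pvF_perm {l1 l2 : List (Int × Int)} (h : l1.Perm l2) (q : Int × Int × Int × Int) :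
    pvF l1 q = pvF l2 q := by
  simp only [pvF, pvStab, pvBoth, h.countP_eq]


-- the while loop splits off the sorted prefix with fst < lo
theorem pvAdvance_split (lo : Int) : ∀ (rest : List (Int × Int)) (seen : List Int),
    ∃ tk rm, rest = tk ++ rm ∧
      pvAdvance lo rest seen = (rm, tk.foldl (fun s iv => pvInsort iv.2 s) seen) ∧
      (∀ t ∈ tk, t.1 < lo) ∧ (∀ hd tl, rm = hd :: tl → ¬ hd.1 < lo) := by
  intro rest
  induction rest with
  | nil => exact fun seen => ⟨[], [], rfl, rfl, by simp, by simp⟩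
  | cons iv r ih =>
    intro seen
    by_cases hlt : iv.1 < lo
    · obtain ⟨tk, rm, he, hadv, htk, hrm⟩ := ih (pvInsort iv.2 seen)
      refine ⟨iv :: tk, rm, by simp [he], ?_, ?_, hrm⟩
      · simp [pvAdvance, hlt, hadv]
      · intro t ht; rcases List.mem_cons.mp ht with rfl | ht
        · exact hlt
        · exact htk t ht
    · refine ⟨[], iv :: r, rfl, by simp [pvAdvance, hlt], by simp, ?_⟩
      intro hd tl he; cases he; exact hlt

theorem pv_foldl_insort_perm (tk : List (Int × Int)) : ∀ (seen : List Int),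
    (tk.foldl (fun s iv => pvInsort iv.2 s) seen).Perm (tk.map (·.2) ++ seen) := by
  induction tk with
  | nil => simp
  | cons iv t ih =>
    intro seen
    simp only [List.foldl_cons, List.map_cons, List.cons_append]
    exact (ih (pvInsort iv.2 seen)).trans
      (((List.Perm.append_left (t.map (·.2)) (pvInsort_perm iv.2 seen))).trans List.perm_middle)

theorem pv_foldl_insort_pairwise (tk : List (Int × Int)) : ∀ (seen : List Int),
    seen.Pairwise (· ≤ ·) → (tk.foldl (fun s iv => pvInsort iv.2 s) seen).Pairwise (· ≤ ·) := by
  induction tk with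
  | nil => exact fun _ h => h
  | cons iv t ih => exact fun seen h => ih _ (pvInsort_pairwise _ _ h)


theorem pv_if_max (a b : Int) : (if b > a then b else a) = max a b := by
  rcases le_total b a with h | h
  · simp [max_eq_left h]; omega
  · rcases eq_or_lt_of_le h with rfl | h'
    · simp [max_self]
    · simp [h', max_eq_right h]

theorem pvSweep_spec (starts ends : List Int)
    (hsp : starts.Pairwise (· ≤ ·)) (hep : ends.Pairwise (· ≤ ·)) :
    ∀ (qs : List (Int × Int × Int × Int)) (pre rest : List (Int × Int)) (seen : List Int) (best : Int),
    ((pre ++ rest).Pairwise (fun a b => a.1 ≤ b.1)) →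
    (qs.Pairwise (fun a b => a.1 ≤ b.1)) →
    (∀ p ∈ pre, ∀ q ∈ qs, p.1 < q.1) →
    seen.Perm (pre.map (·.2)) →
    seen.Pairwise (· ≤ ·) →
    starts.Perm ((pre ++ rest).map (·.1)) →
    ends.Perm ((pre ++ rest).map (·.2)) →
    pvSweep starts ends qs rest seen best =
      qs.foldl (fun b q => max b (pvF (pre ++ rest) q)) best := by
  intro qs
  induction qs with
  | nil => intros; rfl
  | cons q qs ih =>
    intro pre rest seen best hivp hqp hpq hsperm hssort hstp hetp
    obtain ⟨tk, rm, hrest, hadv, htk, hrm⟩ := pvAdvance_split q.1 rest seen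
    have hlist : (pre ++ tk) ++ rm = pre ++ rest := by rw [hrest, List.append_assoc]
    have hseen' : (tk.foldl (fun s iv => pvInsort iv.2 s) seen).Perm ((pre ++ tk).map (·.2)) := by
      refine (pv_foldl_insort_perm tk seen).trans ?_
      rw [List.map_append]
      exact ((List.Perm.append_left (tk.map (·.2)) hsperm)).trans (List.perm_append_comm)
    have hssort' : (tk.foldl (fun s iv => pvInsort iv.2 s) seen).Pairwise (· ≤ ·) :=
      pv_foldl_insort_pairwise tk seen hssort
    have hpre' : ∀ p ∈ pre ++ tk, p.1 < q.1 := by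
      intro p hp
      rcases List.mem_append.mp hp with hp | hp
      · exact hpq p hp q List.mem_cons_self
      · exact htk p hp
    have hrm' : ∀ r ∈ rm, ¬ r.1 < q.1 := by
      have hrmp : rm.Pairwise (fun a b => a.1 ≤ b.1) := by
        have := (List.pairwise_append.mp hivp).2.1
        rw [hrest] at this
        exact (List.pairwise_append.mp this).2.1
      cases rm with
      | nil => simp
      | cons hd tl =>
        intro r hr
        rcases List.mem_cons.mp hr with rfl | hr
        · exact hrm _ _ rfl
        · have h1 := hrm _ _ rfl
          have h2 := (List.pairwise_cons.mp hrmp).1 r hr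
          omega
    -- the three counts
    have hsl : (PySem.List.bisectLeft starts q.2.2.1 : Int) =
        ((pre ++ rest).countP (fun iv => decide (iv.1 < q.2.2.1)) : Int) := by
      rw [pv_bisectLeft_eq starts _ hsp, hstp.countP_eq, List.countP_map]; rfl
    have hsl2 : (PySem.List.bisectLeft starts q.2.2.2 : Int) =
        ((pre ++ rest).countP (fun iv => decide (iv.1 < q.2.2.2)) : Int) := by
      rw [pv_bisectLeft_eq starts _ hsp, hstp.countP_eq, List.countP_map]; rfl
    have her : (PySem.List.bisectRight ends q.2.2.1 : Int) =
        ((pre ++ rest).countP (fun iv => decide (iv.2 ≤ q.2.2.1)) : Int) := by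
      rw [pv_bisectRight_eq ends _ hep, hetp.countP_eq, List.countP_map]; rfl
    have her2 : (PySem.List.bisectRight ends q.2.2.2 : Int) =
        ((pre ++ rest).countP (fun iv => decide (iv.2 ≤ q.2.2.2)) : Int) := by
      rw [pv_bisectRight_eq ends _ hep, hetp.countP_eq, List.countP_map]; rfl
    have hboth : ((tk.foldl (fun s iv => pvInsort iv.2 s) seen).length : Int) -
        (PySem.List.bisectRight (tk.foldl (fun s iv => pvInsort iv.2 s) seen) q.2.1 : Int) =
        ((pre ++ rest).countP (fun iv => decide (iv.1 < q.1 ∧ q.2.1 < iv.2)) : Int) := by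
      set sn := tk.foldl (fun s iv => pvInsort iv.2 s) seen with hsn
      have hlen := List.length_eq_countP_add_countP (fun y => decide (y ≤ q.2.1)) (l := sn)
      rw [pv_bisectRight_eq sn _ hssort']
      have hgt : sn.countP (fun a => decide ¬(decide (q.2.1 < a) = true)) =
          sn.countP (fun y => decide (y ≤ q.2.1)) := by
        apply List.countP_congr; intro x _
        simp only [decide_eq_true_eq, decide_not, Bool.not_eq_true', decide_eq_false_iff_not]
        omega
      have hcnt : sn.countP (fun y => decide (q.2.1 < y)) =
          (pre ++ rest).countP (fun iv => decide (iv.1 < q.1 ∧ q.2.1 < iv.2)) := by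
        rw [hseen'.countP_eq, List.countP_map]
        have e1 : (pre ++ rest).countP (fun iv => decide (iv.1 < q.1 ∧ q.2.1 < iv.2)) =
            (pre ++ tk).countP (fun iv => decide (iv.1 < q.1 ∧ q.2.1 < iv.2)) +
            rm.countP (fun iv => decide (iv.1 < q.1 ∧ q.2.1 < iv.2)) := by
          rw [← hlist, List.countP_append]
        have hz : rm.countP (fun iv => decide (iv.1 < q.1 ∧ q.2.1 < iv.2)) = 0 := by
          rw [List.countP_eq_zero]
          intro iv hiv
          have := hrm' iv hiv
          simp only [decide_eq_true_eq]
          omega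
        have hc : (pre ++ tk).countP ((fun y => decide (q.2.1 < y)) ∘ (·.2)) =
            (pre ++ tk).countP (fun iv => decide (iv.1 < q.1 ∧ q.2.1 < iv.2)) := by
          apply List.countP_congr
          intro iv hiv
          have := hpre' iv hiv
          simp only [Function.comp_apply, decide_eq_true_eq]
          omega
        rw [hc] at *
        omega
      have hlen2 := List.length_eq_countP_add_countP (fun y => decide (q.2.1 < y)) (l := sn)
      have hgt2 : sn.countP (fun a => decide ¬(decide (q.2.1 < a) = true)) =
          sn.countP (fun y => decide (y ≤ q.2.1)) := hgt
      rw [← hcnt]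
      omega
    simp only [pvSweep, hadv]
    have hceq : (PySem.List.bisectLeft starts q.2.2.1 : Int) - (PySem.List.bisectRight ends q.2.2.1 : Int) +
          ((PySem.List.bisectLeft starts q.2.2.2 : Int) - (PySem.List.bisectRight ends q.2.2.2 : Int)) -
          (((tk.foldl (fun s iv => pvInsort iv.2 s) seen).length : Int) -
            (PySem.List.bisectRight (tk.foldl (fun s iv => pvInsort iv.2 s) seen) q.2.1 : Int)) =
        pvF (pre ++ rest) q := by
      rw [hsl, hsl2, her, her2, hboth]; rfl
    rw [hceq, pv_if_max, List.foldl_cons]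
    have h3 : ∀ p ∈ pre ++ tk, ∀ q' ∈ qs, p.1 < q'.1 := by
      intro p hp q' hq'
      have h1 := hpre' p hp
      have h2 := (List.pairwise_cons.mp hqp).1 q' hq'
      omega
    have := ih (pre ++ tk) rm (tk.foldl (fun s iv => pvInsort iv.2 s) seen)
      (max best (pvF (pre ++ rest) q))
      (by rw [hlist]; exact hivp) (List.pairwise_cons.mp hqp).2 h3 hseen' hssort'
      (by rw [hlist]; exact hstp) (by rw [hlist]; exact hetp)
    rw [hlist] at this
    exact this

theorem pvQueries_length (dest : String) (vbs : List (Int × (Int × String) × (Int × String))) :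
    (pvQueries dest vbs).length = pvCnt dest vbs := by
  simp [pvQueries, pvCnt, List.countP_eq_length_filter]

theorem pvBest_eq (queries : List (Int × Int × Int × Int)) (ivals : List (Int × Int)) :
    pvSweep (PySem.List.sorted (ivals.map (·.1)) (fun x => x))
        (PySem.List.sorted (ivals.map (·.2)) (fun x => x))
        (PySem.List.sorted queries (·.1)) (PySem.List.sorted ivals (·.1)) [] 0 =
      queries.foldl (fun b q => max b (pvF ivals q)) 0 := by
  have hsp : (PySem.List.sorted (ivals.map (·.1)) (fun x => x)).Pairwise (· ≤ ·) :=
    PySem.List.sorted_pairwise _ _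
  have hep : (PySem.List.sorted (ivals.map (·.2)) (fun x => x)).Pairwise (· ≤ ·) :=
    PySem.List.sorted_pairwise _ _
  have h := pvSweep_spec _ _ hsp hep (PySem.List.sorted queries (·.1)) []
    (PySem.List.sorted ivals (·.1)) [] 0 (by simpa using PySem.List.sorted_pairwise ivals (·.1))
    (PySem.List.sorted_pairwise queries (·.1)) (by simp) (by simp) (by simp)
    (by
      simp only [List.nil_append]
      exact (PySem.List.sorted_perm _ _ _).trans
        (((PySem.List.sorted_perm ivals (·.1) false).map (·.1)).symm))
    (by
      simp only [List.nil_append]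
      exact (PySem.List.sorted_perm _ _ _).trans
        (((PySem.List.sorted_perm ivals (·.1) false).map (·.2)).symm))
  rw [h]
  simp only [List.nil_append]
  have hcong : (PySem.List.sorted queries (·.1)).foldl
      (fun b q => max b (pvF (PySem.List.sorted ivals (·.1)) q)) 0 =
      (PySem.List.sorted queries (·.1)).foldl (fun b q => max b (pvF ivals q)) 0 := by
    apply PySem.List.foldl_congr_mem
    intro acc x _
    rw [pvF_perm (PySem.List.sorted_perm ivals (·.1) false) x]
  rw [hcong]
  letI : Std.Commutative (fun (x y : Int) => max x y) := ⟨fun a b => max_comm a b⟩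
  exact List.Perm.foldl_eq (f := fun b q => max b (pvF ivals q))
    (rcomm := ⟨fun b x y => max_right_comm b (pvF ivals x) (pvF ivals y)⟩)
    (PySem.List.sorted_perm queries (·.1) false) 0

theorem pv_b_canon (movements : List (String × List (Int × (Int × String) × (Int × String)))) :
    estimate_concurrency_alt movements = (pvCanonC movements, pvCanonM movements) := by
  suffices h : ∀ (ms : List (String × List (Int × (Int × String) × (Int × String))))
      (acc : List (String × Int) × List (String × Int)),
      ms.foldl (fun (acc : List (String × Int) × List (String × Int))
          (p : String × List (Int × (Int × String) × (Int × String))) =>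
        let dest := p.1
        let qi := p.2.foldl (fun (qi : List (Int × Int × Int × Int) × List (Int × Int)) q =>
          (if q.2.1.2 ≠ dest then qi.1 ++ [(min q.2.1.1 q.2.2.1, max q.2.1.1 q.2.2.1, q.2.1.1, q.2.2.1)] else qi.1,
           if q.2.1.1 < q.2.2.1 then qi.2 ++ [(q.2.1.1, q.2.2.1)] else qi.2)) (([], []) : List (Int × Int × Int × Int) × List (Int × Int))
        let mpd := if qi.1 ≠ [] then acc.2 ++ [(dest, (qi.1.length : Int))] else acc.2
        let starts := PySem.List.sorted (qi.2.map (·.1)) (fun x => x)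
        let ends := PySem.List.sorted (qi.2.map (·.2)) (fun x => x)
        let ivs := PySem.List.sorted qi.2 (·.1)
        let qs := PySem.List.sorted qi.1 (·.1)
        let best := pvSweep starts ends qs ivs [] 0
        (acc.1 ++ [(dest, best)], mpd)) acc = (acc.1 ++ pvCanonC ms, acc.2 ++ pvCanonM ms) by
    rw [estimate_concurrency_alt, h movements ([], [])]
    simp
  intro ms
  induction ms with
  | nil => intro acc; simp [pvCanonC, pvCanonM]
  | cons p ms ih =>
    intro acc
    rw [List.foldl_cons, ih]
    dsimp only
    have hqi : p.2.foldl (fun (qi : List (Int × Int × Int × Int) × List (Int × Int)) q =>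
        (if q.2.1.2 ≠ p.1 then qi.1 ++ [(min q.2.1.1 q.2.2.1, max q.2.1.1 q.2.2.1, q.2.1.1, q.2.2.1)] else qi.1,
         if q.2.1.1 < q.2.2.1 then qi.2 ++ [(q.2.1.1, q.2.2.1)] else qi.2))
        (([], []) : List (Int × Int × Int × Int) × List (Int × Int)) =
        (pvQueries p.1 p.2, pvIvals p.2) := by
      rw [PySem.List.foldl_prod_mk
        (f := fun (l : List (Int × Int × Int × Int)) (q : Int × (Int × String) × (Int × String)) =>
          if q.2.1.2 ≠ p.1 then l ++ [(min q.2.1.1 q.2.2.1, max q.2.1.1 q.2.2.1, q.2.1.1, q.2.2.1)] else l)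
        (g := fun (l : List (Int × Int)) (q : Int × (Int × String) × (Int × String)) =>
          if q.2.1.1 < q.2.2.1 then l ++ [(q.2.1.1, q.2.2.1)] else l)]
      rw [PySem.List.foldl_append_ite (p := fun (q : Int × (Int × String) × (Int × String)) => q.2.1.2 ≠ p.1),
        PySem.List.foldl_append_ite (p := fun (q : Int × (Int × String) × (Int × String)) => q.2.1.1 < q.2.2.1)]
      simp [pvQueries, pvIvals]
    simp only [hqi]
    rw [pvBest_eq (pvQueries p.1 p.2) (pvIvals p.2)]
    have hne : (pvQueries p.1 p.2 ≠ []) ↔ (pvCnt p.1 p.2 ≠ 0) := by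
      rw [← pvQueries_length p.1 p.2]
      simp [List.length_eq_zero_iff]
    have hC : pvCanonC (p :: ms) = (p.1, pvVal p.1 p.2) :: pvCanonC ms := by
      simp [pvCanonC]
    have hM : pvCanonM (p :: ms) =
        (if pvCnt p.1 p.2 ≠ 0 then [(p.1, (pvCnt p.1 p.2 : Int))] else []) ++ pvCanonM ms := by
      by_cases h0 : pvCnt p.1 p.2 ≠ 0 <;> simp [pvCanonM, h0]
    rw [hC, hM]
    by_cases h0 : pvCnt p.1 p.2 ≠ 0
    · rw [if_pos (hne.mpr h0), if_pos h0, pvQueries_length]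
      simp [pvVal, List.append_assoc]
    · rw [if_neg (fun hx => h0 (hne.mp hx)), if_neg h0]
      simp [pvVal, List.append_assoc]


-- ---- A-side ----
def pvFlatT (ms : List (String × List (Int × (Int × String) × (Int × String)))) :
    List (String × (Int × String × Int × Int)) :=
  ms.flatMap (fun p => p.2.map (fun q => (p.1, pvEntry q)))
def pvK (ms : List (String × List (Int × (Int × String) × (Int × String)))) : List String :=
  ms.flatMap (fun p => (p.2.filter (fun q => decide (q.2.1.2 ≠ p.1))).map (fun _ => p.1))

-- split the first pass's pair state into its two independent dict folds
theorem pv_loop1_split (ms : List (String × List (Int × (Int × String) × (Int × String)))) :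
    ∀ (st : PySem.Dict String (List (Int × String × Int × Int)) × PySem.Dict String Int),
    ms.foldl (fun st p =>
      p.2.foldl (fun (st : PySem.Dict String (List (Int × String × Int × Int)) × PySem.Dict String Int) q =>
        (st.1.modify p.1 [] (fun l => l ++ [(q.1, q.2.1.2, q.2.1.1, q.2.2.1)]),
         if q.2.1.2 ≠ p.1 then st.2.modify p.1 0 (· + 1) else st.2)) st) st =
    (ms.foldl (fun tm p => p.2.foldl (fun (tm : PySem.Dict String (List (Int × String × Int × Int))) q =>
        tm.modify p.1 [] (fun l => l ++ [(q.1, q.2.1.2, q.2.1.1, q.2.2.1)])) tm) st.1,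
     ms.foldl (fun md p => p.2.foldl (fun (md : PySem.Dict String Int) q =>
        if q.2.1.2 ≠ p.1 then md.modify p.1 0 (· + 1) else md) md) st.2) := by
  induction ms with
  | nil => intro st; rfl
  | cons p ms ih =>
    intro st
    rw [List.foldl_cons, List.foldl_cons, List.foldl_cons, ih]
    congr 1
    · congr 1
      rw [← Prod.mk.eta (p := st),
        PySem.List.foldl_prod_mk
          (f := fun (tm : PySem.Dict String (List (Int × String × Int × Int))) q =>
            tm.modify p.1 [] (fun l => l ++ [(q.1, q.2.1.2, q.2.1.1, q.2.2.1)]))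
          (g := fun (md : PySem.Dict String Int) (q : Int × (Int × String) × (Int × String)) =>
            if q.2.1.2 ≠ p.1 then md.modify p.1 0 (· + 1) else md)]
    · congr 1
      rw [← Prod.mk.eta (p := st),
        PySem.List.foldl_prod_mk
          (f := fun (tm : PySem.Dict String (List (Int × String × Int × Int))) q =>
            tm.modify p.1 [] (fun l => l ++ [(q.1, q.2.1.2, q.2.1.1, q.2.2.1)]))
          (g := fun (md : PySem.Dict String Int) (q : Int × (Int × String) × (Int × String)) =>
            if q.2.1.2 ≠ p.1 then md.modify p.1 0 (· + 1) else md)]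

-- the timings pass is one flat grouping fold
theorem pv_tm_flat (ms : List (String × List (Int × (Int × String) × (Int × String))))
    (tm : PySem.Dict String (List (Int × String × Int × Int))) :
    ms.foldl (fun tm p => p.2.foldl (fun (tm : PySem.Dict String (List (Int × String × Int × Int))) q =>
        tm.modify p.1 [] (fun l => l ++ [(q.1, q.2.1.2, q.2.1.1, q.2.2.1)])) tm) tm =
    (pvFlatT ms).foldl (fun d pr => d.modify pr.1 [] (fun l => l ++ [pr.2])) tm := by
  rw [pvFlatT, List.foldl_flatMap]
  apply PySem.List.foldl_congr_mem
  intro acc p _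
  rw [List.foldl_map]
  rfl

-- the movements_per_dest pass is Counter(pvK ms)
theorem pv_md_counter (ms : List (String × List (Int × (Int × String) × (Int × String)))) :
    ms.foldl (fun md p => p.2.foldl (fun (md : PySem.Dict String Int) q =>
        if q.2.1.2 ≠ p.1 then md.modify p.1 0 (· + 1) else md) md) PySem.Dict.empty =
    PySem.Dict.counter (pvK ms) := by
  rw [PySem.Dict.counter_eq_foldl, pvK, List.foldl_flatMap]
  apply PySem.List.foldl_congr_mem
  intro acc p _
  rw [List.foldl_map,
    PySem.List.foldl_ite_eq_foldl_filter (p := fun (q : Int × (Int × String) × (Int × String)) => q.2.1.2 ≠ p.1)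
      (f := fun (md : PySem.Dict String Int) _ => md.modify p.1 0 (· + 1))]


theorem pv_flat_filter (d : String) (vbs : List (Int × (Int × String) × (Int × String))) :
    ∀ (ms : List (String × List (Int × (Int × String) × (Int × String)))),
    (ms.map Prod.fst).Nodup → (d, vbs) ∈ ms →
    ((pvFlatT ms).filter (fun pr => pr.1 == d)).map (·.2) = pvEntries vbs := by
  intro ms
  induction ms with
  | nil => simp
  | cons p ms ih =>
    intro hnd hmem
    have hnd' : p.1 ∉ List.map Prod.fst ms ∧ (List.map Prod.fst ms).Nodup := by
      rw [List.map_cons, List.nodup_cons] at hnd; exact hnd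
    rw [pvFlatT, List.flatMap_cons, List.filter_append, List.map_append, ← pvFlatT]
    rcases List.mem_cons.mp hmem with heq | hmem'
    · cases heq
      have h1 : (List.map (fun q => (d, pvEntry q)) vbs).filter (fun pr => pr.1 == d) =
          List.map (fun q => (d, pvEntry q)) vbs := by
        rw [List.filter_eq_self]
        intro a ha
        rcases List.mem_map.mp ha with ⟨q, _, rfl⟩
        simp
      have h2 : (pvFlatT ms).filter (fun pr => pr.1 == d) = [] := by
        rw [List.filter_eq_nil_iff]
        intro a ha
        rcases List.mem_flatMap.mp ha with ⟨p', hp', ha'⟩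
        rcases List.mem_map.mp ha' with ⟨q, _, rfl⟩
        have : p'.1 ∈ ms.map Prod.fst := List.mem_map_of_mem hp'
        simp only [beq_iff_eq]
        intro hc; exact hnd'.1 (by rw [← hc]; exact this)
      rw [h1, h2]
      simp [pvEntries, pvEntry]
    · have hpd : p.1 ≠ d := by
        intro hc
        exact hnd'.1 (by rw [hc]; exact List.mem_map_of_mem hmem')
      have h1 : (List.map (fun q => (p.1, pvEntry q)) p.2).filter (fun pr => pr.1 == d) = [] := by
        rw [List.filter_eq_nil_iff]
        intro a ha
        rcases List.mem_map.mp ha with ⟨q, _, rfl⟩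
        simpa using hpd
      rw [h1, ih hnd'.2 hmem']
      simp

theorem pv_timings_getD (ms : List (String × List (Int × (Int × String) × (Int × String))))
    (hnd : (ms.map Prod.fst).Nodup) (d : String) (vbs : List (Int × (Int × String) × (Int × String)))
    (hmem : (d, vbs) ∈ ms) :
    ((pvFlatT ms).foldl (fun dd pr => dd.modify pr.1 [] (fun l => l ++ [pr.2]))
      (PySem.Dict.empty : PySem.Dict String (List (Int × String × Int × Int)))).getD d [] = pvEntries vbs := by
  rw [PySem.Dict.getD_foldl_modify_append, pv_flat_filter d vbs ms hnd hmem]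
  simp

-- pvK members are destinations
theorem pv_mem_pvK {k : String} {ms : List (String × List (Int × (Int × String) × (Int × String)))}
    (h : k ∈ pvK ms) : k ∈ ms.map Prod.fst := by
  rcases List.mem_flatMap.mp h with ⟨p, hp, hk⟩
  rcases List.mem_map.mp hk with ⟨q, _, rfl⟩
  exact List.mem_map_of_mem hp

theorem pv_ofList_replicate (n : Nat) (d : String) :
    PySem.Set.ofList (List.replicate n d) = if n = 0 then [] else [d] := by
  induction n with
  | zero => rfl
  | succ n ih =>
    rw [List.replicate_succ, PySem.Set.ofList_cons, ih]
    cases n with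
    | zero => simp [PySem.Set.discard]
    | succ m => simp [PySem.Set.discard]

theorem pv_counter_items (ms : List (String × List (Int × (Int × String) × (Int × String))))
    (hnd : (ms.map Prod.fst).Nodup) :
    (PySem.Set.ofList (pvK ms)).map (fun k => (k, ((pvK ms).count k : Int))) = pvCanonM ms := by
  induction ms with
  | nil => simp [pvK, pvCanonM]
  | cons p ms ih =>
    have hnd' : p.1 ∉ List.map Prod.fst ms ∧ (List.map Prod.fst ms).Nodup := by
      rw [List.map_cons, List.nodup_cons] at hnd; exact hnd
    have hblock : (p.2.filter (fun q => decide (q.2.1.2 ≠ p.1))).map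
        (fun (_ : Int × (Int × String) × (Int × String)) => p.1) =
        List.replicate (pvCnt p.1 p.2) p.1 := by
      rw [List.map_const', pvCnt, List.countP_eq_length_filter]
    have hK : pvK (p :: ms) = List.replicate (pvCnt p.1 p.2) p.1 ++ pvK ms := by
      rw [pvK, List.flatMap_cons, hblock]; rfl
    have hnotin : p.1 ∉ pvK ms := fun hc => hnd'.1 (pv_mem_pvK hc)
    rw [hK]
    by_cases h0 : pvCnt p.1 p.2 = 0
    · rw [h0]
      simp only [List.replicate_zero, List.nil_append]
      rw [ih hnd'.2]
      simp [pvCanonM, h0]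
    · have hofl : PySem.Set.ofList (List.replicate (pvCnt p.1 p.2) p.1 ++ pvK ms) =
          p.1 :: PySem.Set.ofList (pvK ms) := by
        rw [PySem.Set.ofList_append, pv_ofList_replicate, if_neg h0,
          PySem.Set.update_eq_append_filter]
        have : (PySem.Set.ofList (pvK ms)).filter (fun y => !(PySem.Set.contains [p.1] y)) =
            PySem.Set.ofList (pvK ms) := by
          rw [List.filter_eq_self]
          intro a ha
          have ham : a ∈ pvK ms := (PySem.Set.mem_ofList _ _).mp ha
          have : a ≠ p.1 := fun hc => hnotin (hc ▸ ham)
          simp [PySem.Set.contains, this]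
        rw [this]
        rfl
      rw [hofl, List.map_cons]
      have hcnth : (List.replicate (pvCnt p.1 p.2) p.1 ++ pvK ms).count p.1 = pvCnt p.1 p.2 := by
        rw [List.count_append, List.count_replicate, List.count_eq_zero.mpr hnotin]
        simp
      have htail : (PySem.Set.ofList (pvK ms)).map
          (fun k => (k, ((List.replicate (pvCnt p.1 p.2) p.1 ++ pvK ms).count k : Int))) =
          (PySem.Set.ofList (pvK ms)).map (fun k => (k, ((pvK ms).count k : Int))) := by
        apply List.map_congr_left
        intro k hk
        have hkm : k ∈ pvK ms := (PySem.Set.mem_ofList _ _).mp hk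
        have hkne : k ≠ p.1 := fun hc => hnotin (hc ▸ hkm)
        have hbe : (p.1 == k) = false := by
          rw [beq_eq_false_iff_ne]; exact fun hc => hkne hc.symm
        rw [List.count_append, List.count_replicate, hbe]
        simp
      rw [hcnth, htail, ih hnd'.2]
      simp [pvCanonM, h0]


-- inclusion–exclusion: the stabbing count is two point-stab counts minus the both-count
theorem pv_ie (s e : Int) (l : List (Int × (Int × String) × (Int × String))) :
    ((l.countP (fun r => decide ((r.2.1.1 < s ∧ s < r.2.2.1) ∨ (r.2.1.1 < e ∧ e < r.2.2.1)))) : Int) =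
    pvF (pvIvals l) (min s e, max s e, s, e) := by
  have hcase : (min s e = s ∧ max s e = e ∧ s ≤ e) ∨ (min s e = e ∧ max s e = s ∧ e ≤ s) := by
    rcases le_total s e with h | h
    · exact Or.inl ⟨min_eq_left h, max_eq_right h, h⟩
    · exact Or.inr ⟨min_eq_right h, max_eq_left h, h⟩
  induction l with
  | nil => simp [pvF, pvStab, pvBoth, pvIvals]
  | cons r t ih =>
    by_cases hlt : r.2.1.1 < r.2.2.1
    · have hIV : pvIvals (r :: t) = (r.2.1.1, r.2.2.1) :: pvIvals t := by
        simp [pvIvals, hlt]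
    -- expand all five head indicators and close linearly
      simp only [pvF, pvStab, pvBoth, hIV, List.countP_cons, decide_eq_true_eq] at ih ⊢
      rcases hcase with ⟨h1, h2, h3⟩ | ⟨h1, h2, h3⟩ <;>
        · simp only [h1, h2] at ih ⊢
          split_ifs <;> push_cast at ih ⊢ <;> omega
    · have hIV : pvIvals (r :: t) = pvIvals t := by
        simp [pvIvals, hlt]
      simp only [pvF, pvStab, pvBoth, hIV, List.countP_cons, decide_eq_true_eq] at ih ⊢
      rcases hcase with ⟨h1, h2, h3⟩ | ⟨h1, h2, h3⟩ <;>
        · simp only [h1, h2] at ih ⊢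
          split_ifs <;> push_cast at ih ⊢ <;> omega

-- with distinct vbucket ids the 'vbucket != _vbucket' guard drops out
theorem pv_drop_vb (vbs : List (Int × (Int × String) × (Int × String)))
    (hnd : (vbs.map Prod.fst).Nodup) (q : Int × (Int × String) × (Int × String)) (hq : q ∈ vbs) :
    (pvEntries vbs).countP (fun t => decide (t.1 ≠ q.1 ∧
        ((t.2.2.1 < q.2.1.1 ∧ q.2.1.1 < t.2.2.2) ∨ (t.2.2.1 < q.2.2.1 ∧ q.2.2.1 < t.2.2.2)))) =
    vbs.countP (fun r => decide ((r.2.1.1 < q.2.1.1 ∧ q.2.1.1 < r.2.2.1) ∨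
        (r.2.1.1 < q.2.2.1 ∧ q.2.2.1 < r.2.2.1))) := by
  rw [pvEntries, List.countP_map]
  obtain ⟨l1, l2, rfl⟩ := List.append_of_mem hq
  have hne : ∀ r ∈ l1 ++ l2, r.1 ≠ q.1 := by
    have h1 : ((l1 ++ q :: l2).map Prod.fst).Nodup := hnd
    rw [List.map_append, List.map_cons] at h1
    have h2 := (List.nodup_middle.mp h1)
    have h3 := (List.nodup_cons.mp h2).1
    intro r hr hc
    rw [← List.map_append] at h3
    exact h3 (hc ▸ List.mem_map_of_mem (f := Prod.fst) hr)
  rw [List.countP_append, List.countP_append, List.countP_cons, List.countP_cons]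
  have hmid1 : ((fun t => decide (t.1 ≠ q.1 ∧
      ((t.2.2.1 < q.2.1.1 ∧ q.2.1.1 < t.2.2.2) ∨ (t.2.2.1 < q.2.2.1 ∧ q.2.2.1 < t.2.2.2)))) ∘ pvEntry) q = false := by
    simp [pvEntry]
  have hmid2 : (fun (r : Int × (Int × String) × (Int × String)) =>
      decide ((r.2.1.1 < q.2.1.1 ∧ q.2.1.1 < r.2.2.1) ∨ (r.2.1.1 < q.2.2.1 ∧ q.2.2.1 < r.2.2.1))) q = false := by
    simp only [decide_eq_false_iff_not]
    omega
  have hcg : ∀ (l' : List (Int × (Int × String) × (Int × String))), (∀ r ∈ l', r ∈ l1 ++ l2) → l'.countP ((fun t => decide (t.1 ≠ q.1 ∧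
      ((t.2.2.1 < q.2.1.1 ∧ q.2.1.1 < t.2.2.2) ∨ (t.2.2.1 < q.2.2.1 ∧ q.2.2.1 < t.2.2.2)))) ∘ pvEntry) =
      l'.countP (fun r => decide ((r.2.1.1 < q.2.1.1 ∧ q.2.1.1 < r.2.2.1) ∨
        (r.2.1.1 < q.2.2.1 ∧ q.2.2.1 < r.2.2.1))) := by
    intro l' hl'
    apply List.countP_congr
    intro r hr
    have := hne r (hl' r hr)
    simp only [Function.comp_apply, pvEntry, decide_eq_true_eq]
    tauto
  simp only [hmid1, hmid2, if_false, Bool.false_eq_true]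
  rw [hcg l1 (fun r hr => List.mem_append.mpr (Or.inl hr)),
    hcg l2 (fun r hr => List.mem_append.mpr (Or.inr hr))]

theorem pv_mx_eq (dest : String) (vbs : List (Int × (Int × String) × (Int × String)))
    (hnd : (vbs.map Prod.fst).Nodup) :
    vbs.foldl (fun mx q =>
      if q.2.1.2 ≠ dest then
        max mx ((pvEntries vbs).foldl (fun c t =>
          if t.1 ≠ q.1 then
            if (t.2.2.1 < q.2.1.1 ∧ q.2.1.1 < t.2.2.2) ∨ (t.2.2.1 < q.2.2.1 ∧ q.2.2.1 < t.2.2.2) then c + 1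
            else c
          else c) (0 : Int))
      else mx) (0 : Int) = pvVal dest vbs := by
  have hstep : ∀ (mx : Int) (q : Int × (Int × String) × (Int × String)), q ∈ vbs →
      (if q.2.1.2 ≠ dest then
        max mx ((pvEntries vbs).foldl (fun c t =>
          if t.1 ≠ q.1 then
            if (t.2.2.1 < q.2.1.1 ∧ q.2.1.1 < t.2.2.2) ∨ (t.2.2.1 < q.2.2.1 ∧ q.2.2.1 < t.2.2.2) then c + 1
            else c
          else c) (0 : Int))
      else mx) =
      (if q.2.1.2 ≠ dest then
        max mx (pvF (pvIvals vbs) (min q.2.1.1 q.2.2.1, max q.2.1.1 q.2.2.1, q.2.1.1, q.2.2.1)) else mx) := by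
    intro mx q hq
    by_cases hsn : q.2.1.2 ≠ dest
    · rw [if_pos hsn, if_pos hsn]
      have h1 : (pvEntries vbs).foldl (fun c t =>
          if t.1 ≠ q.1 then
            if (t.2.2.1 < q.2.1.1 ∧ q.2.1.1 < t.2.2.2) ∨ (t.2.2.1 < q.2.2.1 ∧ q.2.2.1 < t.2.2.2) then c + 1
            else c
          else c) (0 : Int) =
          (pvEntries vbs).foldl (fun c t =>
            if t.1 ≠ q.1 ∧ ((t.2.2.1 < q.2.1.1 ∧ q.2.1.1 < t.2.2.2) ∨ (t.2.2.1 < q.2.2.1 ∧ q.2.2.1 < t.2.2.2))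
            then c + 1 else c) (0 : Int) := by
        apply PySem.List.foldl_congr_mem
        intro acc t _
        split_ifs <;> tauto
      rw [h1, PySem.List.foldl_ite_add_one
        (p := fun (t : Int × String × Int × Int) => t.1 ≠ q.1 ∧
          ((t.2.2.1 < q.2.1.1 ∧ q.2.1.1 < t.2.2.2) ∨ (t.2.2.1 < q.2.2.1 ∧ q.2.2.1 < t.2.2.2)))]
      rw [zero_add]
      congr 1
      calc ((pvEntries vbs).countP (fun t => decide (t.1 ≠ q.1 ∧
            ((t.2.2.1 < q.2.1.1 ∧ q.2.1.1 < t.2.2.2) ∨ (t.2.2.1 < q.2.2.1 ∧ q.2.2.1 < t.2.2.2)))) : Int)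
          = (vbs.countP (fun r => decide ((r.2.1.1 < q.2.1.1 ∧ q.2.1.1 < r.2.2.1) ∨
              (r.2.1.1 < q.2.2.1 ∧ q.2.2.1 < r.2.2.1))) : Int) := by
            rw [pv_drop_vb vbs hnd q hq]
        _ = pvF (pvIvals vbs) (min q.2.1.1 q.2.2.1, max q.2.1.1 q.2.2.1, q.2.1.1, q.2.2.1) :=
            pv_ie q.2.1.1 q.2.2.1 vbs
    · rw [if_neg hsn, if_neg hsn]
  rw [PySem.List.foldl_congr_mem vbs
    (fun (mx : Int) (q : Int × (Int × String) × (Int × String)) =>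
      if q.2.1.2 ≠ dest then
        max mx ((pvEntries vbs).foldl (fun c t =>
          if t.1 ≠ q.1 then
            if (t.2.2.1 < q.2.1.1 ∧ q.2.1.1 < t.2.2.2) ∨ (t.2.2.1 < q.2.2.1 ∧ q.2.2.1 < t.2.2.2) then c + 1
            else c
          else c) (0 : Int))
      else mx)
    (fun mx q =>
      if q.2.1.2 ≠ dest then
        max mx (pvF (pvIvals vbs) (min q.2.1.1 q.2.2.1, max q.2.1.1 q.2.2.1, q.2.1.1, q.2.2.1)) else mx)
    (0 : Int) (fun acc x hx => hstep acc x hx)]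
  rw [PySem.List.foldl_ite_eq_foldl_filter
    (p := fun (q : Int × (Int × String) × (Int × String)) => q.2.1.2 ≠ dest)
    (f := fun mx q => max mx (pvF (pvIvals vbs) (min q.2.1.1 q.2.2.1, max q.2.1.1 q.2.2.1, q.2.1.1, q.2.2.1)))]
  rw [pvVal, pvQueries, List.foldl_map]

theorem pv_a_canon (movements : List (String × List (Int × (Int × String) × (Int × String))))
    (h : Pre_estimate_concurrency movements) :
    estimate_concurrency movements = (pvCanonC movements, pvCanonM movements) := by
  obtain ⟨hndD, hndV⟩ := h
  unfold estimate_concurrency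
  dsimp only
  rw [pv_loop1_split]
  dsimp only
  rw [pv_tm_flat, pv_md_counter, PySem.Dict.items_counter, pv_counter_items movements hndD]
  have hcpd := PySem.Dict.items_foldl_insert_fresh movements Prod.fst
    (fun p => p.2.foldl (fun mx q =>
      if q.2.1.2 ≠ p.1 then
        let c := (((pvFlatT movements).foldl (fun d pr => d.modify pr.1 [] (fun l => l ++ [pr.2]))
            (PySem.Dict.empty : PySem.Dict String (List (Int × String × Int × Int)))).getD p.1 []).foldl (fun c t =>
          if t.1 ≠ q.1 then
            if (t.2.2.1 < q.2.1.1 ∧ q.2.1.1 < t.2.2.2) ∨ (t.2.2.1 < q.2.2.1 ∧ q.2.2.1 < t.2.2.2) then c + 1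
            else c
          else c) (0 : Int)
        max mx c
      else mx) (0 : Int))
    PySem.Dict.empty (fun a _ => PySem.Dict.contains_empty a.1) hndD
  rw [hcpd]
  have hemp : (PySem.Dict.empty : PySem.Dict String Int).items = [] := rfl
  rw [hemp, List.nil_append]
  congr 1
  rw [pvCanonC]
  apply List.map_congr_left
  intro p hp
  dsimp only
  have hget := pv_timings_getD movements hndD p.1 p.2 (by rwa [Prod.mk.eta])
  rw [hget, pv_mx_eq p.1 p.2 (hndV p hp)]

-- ===== VERDICT (by name: the statement is the Claim_ definition above) =====
theorem estimate_concurrency_spec : Claim_equal_estimate_concurrency := by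
  intro movements _ hpre
  unfold Spec_estimate_concurrency
  rw [pv_a_canon movements hpre, pv_b_canon movements]
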